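-- pv_equiv track=rewrite | github.com/mahmoudYsheliel/isi_lite | e2e/e2e_utils.py | get_binary_string_specific_length
-- ===== SOURCE A (Python) =====
-- def get_binary_string_specific_length(value: int, length: int) -> str:
--     string = ''
--     for i in range(length):
--         if value % 2 == 0:
--             string += '0'
--         else:
--             string += '1'
--         value = value // 2
--     return string
-- ===== SOURCE B (Python) =====
-- def get_binary_string_specific_length(value: int, length: int) -> str:
--     if length <= 0:
--         return ''
--     m = value % (1 << length)
--     return format(m, '0{}b'.format(length))[::-1]
-- ===== Notes on version B (the rewrite author's own statement) =====
-- stated objective: idiomatic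
-- what changed: Replaces the per-bit loop (repeated %2 / //2 with string accumulation) by one modular reduction of the low `length` bits followed by a single format(..., '0Nb') call reversed to LSB-first.
import Mathlib
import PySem

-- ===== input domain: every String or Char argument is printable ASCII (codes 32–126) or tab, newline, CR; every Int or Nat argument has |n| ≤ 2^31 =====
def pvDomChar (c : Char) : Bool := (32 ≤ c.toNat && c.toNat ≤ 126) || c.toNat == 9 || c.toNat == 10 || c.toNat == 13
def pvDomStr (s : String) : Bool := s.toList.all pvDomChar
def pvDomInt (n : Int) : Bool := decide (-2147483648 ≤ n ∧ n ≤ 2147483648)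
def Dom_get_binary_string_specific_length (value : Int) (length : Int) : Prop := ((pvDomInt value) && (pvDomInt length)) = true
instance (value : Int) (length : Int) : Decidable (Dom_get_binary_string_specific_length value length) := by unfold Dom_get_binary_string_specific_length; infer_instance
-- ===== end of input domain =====

-- B replaces A's per-bit loop by one modular reduction (value % 2^length) and a single
-- MSB-first zero-padded binary rendering reversed to LSB-first (idiomatic one-shot formatting).

-- ===== PORT A =====
-- literal transliteration of A: for i in range(length): append '0'/'1' by value % 2, value //= 2
def get_binary_string_specific_length (value : Int) (length : Int) : String :=
  ((PySem.List.pyRange 0 length 1).foldl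
    (fun (st : String × Int) _ =>
      ((if PySem.Int.mod st.2 2 = 0 then st.1 ++ "0" else st.1 ++ "1"),
       PySem.Int.floordiv st.2 2))
    ("", value)).1

-- ===== PORT B =====
-- binMSB n = the digits of format(n, 'b') without leading zeros (empty for 0; padding supplies them)
def binMSB (n : Nat) : List Char :=
  if h : n = 0 then []
  else binMSB (n / 2) ++ [if n % 2 = 1 then '1' else '0']
decreasing_by exact Nat.div_lt_self (Nat.pos_of_ne_zero h) (by omega)

-- literal transliteration of B: m = value % (1 << length); format(m, '0{length}b')[::-1]
def get_binary_string_specific_length_alt (value : Int) (length : Int) : String :=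
  if length ≤ 0 then ""
  else
    let m : Nat := (PySem.Int.mod value ((1 : Int) <<< length.toNat)).toNat
    String.ofList ((List.replicate (length.toNat - (binMSB m).length) '0' ++ binMSB m).reverse)

-- ===== PRECONDITION & SPEC =====
def Spec_get_binary_string_specific_length (value : Int) (length : Int) (out : String) : Prop := out = get_binary_string_specific_length_alt value length
instance (value : Int) (length : Int) (out : String) : Decidable (Spec_get_binary_string_specific_length value length out) := by unfold Spec_get_binary_string_specific_length; infer_instance

-- ===== CLAIM (what is proved, stated in full; the proofs are below) =====
def Claim_equal_get_binary_string_specific_length : Prop := ∀ (value : Int) (length : Int), Dom_get_binary_string_specific_length value length → Spec_get_binary_string_specific_length value length (get_binary_string_specific_length value length)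

-- ===== LEMMAS AND PROOFS =====

-- LSB-first bits of an Int, exactly as A's loop produces them
def lsbInt : Int → Nat → List Char
  | _, 0 => []
  | v, k+1 => (if PySem.Int.mod v 2 = 0 then '0' else '1') :: lsbInt (PySem.Int.floordiv v 2) k

-- LSB-first bits of a Nat
def lsbNat : Nat → Nat → List Char
  | _, 0 => []
  | n, k+1 => (if n % 2 = 0 then '0' else '1') :: lsbNat (n / 2) k

-- A's fold, characterised
theorem foldA (l : List Int) (s : String) (v : Int) :
    ((l.foldl
      (fun (st : String × Int) _ =>
        ((if PySem.Int.mod st.2 2 = 0 then st.1 ++ "0" else st.1 ++ "1"),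
         PySem.Int.floordiv st.2 2)) (s, v)).1).toList
    = s.toList ++ lsbInt v l.length := by
  induction l generalizing s v with
  | nil => simp [lsbInt]
  | cons a t ih =>
    simp only [List.foldl_cons, List.length_cons, lsbInt]
    rw [ih]
    by_cases h : PySem.Int.mod v 2 = 0
    · rw [if_pos h, if_pos h]; simp
    · rw [if_neg h, if_neg h]; simp

-- bit agreement between A's floor arithmetic and B's modular reduction
theorem lsbInt_eq_lsbNat (k : Nat) : ∀ v : Int, lsbInt v k = lsbNat (v % (2 ^ k : Int)).toNat k := by
  induction k with
  | zero => intro v; rfl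
  | succ k ih =>
    intro v
    set w : Int := v % (2 ^ (k+1) : Int) with hw
    have hpow : (0:Int) < 2 ^ (k+1) := by positivity
    have hw0 : 0 ≤ w := Int.emod_nonneg v (by positivity)
    have hwlt : w < 2 ^ (k+1) := Int.emod_lt_of_pos v hpow
    have hmod2 : w % 2 = v % 2 := Int.emod_emod_of_dvd v ⟨2 ^ k, by ring⟩
    have hdiv : (v / 2) % (2 ^ k : Int) = w / 2 := by
      have hv : v = w + 2 * (2 ^ k * (v / 2 ^ (k+1))) := by
        have h := Int.mul_ediv_add_emod v (2 ^ (k+1))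
        rw [← hw] at h
        linear_combination -h
      have h2 : (2:Int) ≠ 0 := by norm_num
      calc (v / 2) % (2 ^ k : Int)
          = ((w + 2 * (2 ^ k * (v / 2 ^ (k+1)))) / 2) % (2 ^ k : Int) := by rw [← hv]
        _ = (w / 2 + 2 ^ k * (v / 2 ^ (k+1))) % (2 ^ k : Int) := by
              rw [Int.add_mul_ediv_left _ _ h2]
        _ = (w / 2) % (2 ^ k : Int) := Int.add_mul_emod_self_left _ _ _
        _ = w / 2 := by
              apply Int.emod_eq_of_lt (by positivity)
              have : w < 2 ^ k * 2 := by rw [pow_succ] at hwlt; exact hwlt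
              omega
    rw [lsbInt, lsbNat,
      PySem.Int.mod_eq_emod_of_pos (by norm_num : (0:Int) < 2),
      PySem.Int.floordiv_eq_ediv_of_pos (by norm_num : (0:Int) < 2),
      ih (v / 2), hdiv]
    have h1 : (w / 2).toNat = w.toNat / 2 := by omega
    have h2 : (v % 2 = 0) ↔ (w.toNat % 2 = 0) := by omega
    rw [h1]
    simp [h2]

-- B's padded MSB rendering, reversed, is the LSB-first bit string
theorem binRev (k : Nat) : ∀ n : Nat, n < 2 ^ k →
    (binMSB n).reverse ++ List.replicate (k - (binMSB n).length) '0' = lsbNat n k := by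
  induction k with
  | zero =>
    intro n hn
    interval_cases n
    simp [binMSB, lsbNat]
  | succ k ih =>
    intro n hn
    by_cases h : n = 0
    · subst h
      have hb : binMSB 0 = [] := by rw [binMSB]; simp
      have h0 := ih 0 (by positivity)
      rw [hb] at h0 ⊢
      rw [lsbNat, ← h0]
      simp [List.replicate_succ]
    · rw [binMSB]
      simp only [dif_neg h]
      have hlt : n / 2 < 2 ^ k := by
        have : n < 2 ^ k * 2 := by rw [pow_succ] at hn; exact hn
        omega
      have h0 := ih (n / 2) hlt
      rw [lsbNat, ← h0]
      have hlen : k + 1 - ((binMSB (n / 2)).length + 1) = k - (binMSB (n / 2)).length := by omega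
      have hc : (if n % 2 = 1 then '1' else '0') = (if n % 2 = 0 then '0' else '1') := by
        rcases Nat.mod_two_eq_zero_or_one n with h2 | h2 <;> simp [h2]
      simp [List.reverse_append, hlen, hc]

-- ===== VERDICT (by name: the statement is the Claim_ definition above) =====
theorem get_binary_string_specific_length_spec : Claim_equal_get_binary_string_specific_length := by
  unfold Claim_equal_get_binary_string_specific_length Spec_get_binary_string_specific_length
  intro value length _
  unfold get_binary_string_specific_length get_binary_string_specific_length_alt
  by_cases hl : length ≤ 0
  · rw [if_pos hl, PySem.List.pyRange_one_eq_nil (by omega)]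
    rfl
  · rw [if_neg hl]
    apply String.toList_inj.mp
    rw [foldA]
    have hL : (PySem.List.pyRange 0 length 1).length = length.toNat := by
      rw [PySem.List.length_pyRange_one]; congr 1; omega
    rw [hL]
    have hshift : ((1 : Int) <<< length.toNat) = (2 ^ length.toNat : Int) := by
      simp [Int.shiftLeft_eq]
    have hpow : (0:Int) < 2 ^ length.toNat := by positivity
    have hmod : PySem.Int.mod value ((1 : Int) <<< length.toNat) = value % (2 ^ length.toNat : Int) := by
      rw [hshift, PySem.Int.mod_eq_emod_of_pos hpow]
    set m : Nat := (PySem.Int.mod value ((1 : Int) <<< length.toNat)).toNat with hm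
    have hmlt : m < 2 ^ length.toNat := by
      have h1 : value % (2 ^ length.toNat : Int) < 2 ^ length.toNat := Int.emod_lt_of_pos value hpow
      have h2 : (0:Int) ≤ value % (2 ^ length.toNat : Int) := Int.emod_nonneg value (by positivity)
      have : ((2:Int) ^ length.toNat) = ((2 ^ length.toNat : Nat) : Int) := by push_cast; ring
      omega
    rw [lsbInt_eq_lsbNat, ← hmod, ← hm, ← binRev length.toNat m hmlt]
    simp
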